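-- pv_equiv track=rewrite | github.com/Jenellacian/reprehein | sintame.py | check_diagonals_left_to_right
-- ===== SOURCE A (Python) =====
-- def check_diagonals_left_to_right(grid):
--   """
--   Checks if the diagonals (from left to right) of a grid are all equal.
--
--   Args:
--     grid: A 2D list of integers representing the grid.
--
--   Returns:
--     True if all the diagonals are equal, False otherwise.
--   """
--
--   # Get the size of the grid.
--   n = len(grid)
--
--   # Check if the diagonals are all equal.
--   for i in range(n):
--     for j in range(n):
--       if i == j:
--         if grid[i][j] != grid[0][0]:
--           return False
--   return True
-- ===== SOURCE B (Python) =====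
-- def check_diagonals_left_to_right(grid):
--     ref = grid[0][0] if grid else None
--     for i, row in enumerate(grid):
--         if row[i] != ref:
--             return False
--     return True
-- ===== Notes on version B (the rewrite author's own statement) =====
-- stated objective: simpler
-- what changed: Replaces the nested index loops over range(n) x range(n) (whose inner loop only acts when i == j) with a single enumerate pass over the rows comparing each row's diagonal element to the top-left value.
import Mathlib
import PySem

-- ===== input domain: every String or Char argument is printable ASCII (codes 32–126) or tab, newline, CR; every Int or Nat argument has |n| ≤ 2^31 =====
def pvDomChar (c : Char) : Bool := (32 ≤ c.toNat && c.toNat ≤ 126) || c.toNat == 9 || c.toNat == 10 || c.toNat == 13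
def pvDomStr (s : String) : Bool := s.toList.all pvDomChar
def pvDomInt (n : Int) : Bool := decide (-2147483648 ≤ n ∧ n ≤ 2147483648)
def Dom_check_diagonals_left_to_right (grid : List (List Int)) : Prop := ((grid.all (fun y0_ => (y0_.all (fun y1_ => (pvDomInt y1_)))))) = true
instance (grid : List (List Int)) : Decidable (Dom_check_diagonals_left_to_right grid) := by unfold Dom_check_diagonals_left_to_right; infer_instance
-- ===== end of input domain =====

-- B replaces A's nested index loops with one enumerate pass over the rows (simpler).

-- ===== PORT A =====
-- Nested for-loops over range(n); early 'return False' rendered as List.all.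
def check_diagonals_left_to_right (grid : List (List Int)) : Bool :=
  let n : Int := grid.length
  (PySem.List.pyRange 0 n 1).all (fun i =>
    (PySem.List.pyRange 0 n 1).all (fun j =>
      if i == j then
        !(PySem.List.pyGetD (PySem.List.pyGetD grid i []) j 0
            != PySem.List.pyGetD (PySem.List.pyGetD grid 0 []) 0 0)
      else true))

-- ===== PORT B =====
-- the enumerate loop: index counter plus structural recursion over the rows
def pvAltGo (ref : Int) : Int → List (List Int) → Bool
  | _, [] => true
  | i, row :: rest =>
    if PySem.List.pyGetD row i 0 != ref then false else pvAltGo ref (i + 1) rest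

def check_diagonals_left_to_right_alt (grid : List (List Int)) : Bool :=
  match grid with
  | [] => true
  | first :: _ => pvAltGo (PySem.List.pyGetD first 0 0) 0 grid

-- ===== PRECONDITION & SPEC =====
-- Pre_ excludes exactly the grids on which A raises IndexError: those whose first row i with
-- length ≤ i is not preceded by a diagonal mismatch (a mismatch makes A return False early).
def Pre_check_diagonals_left_to_right (grid : List (List Int)) : Prop :=
  ∀ p ∈ grid.zipIdx,
    (p.1.length ≤ p.2 ∧ ∀ q ∈ grid.zipIdx, q.2 < p.2 → q.2 < q.1.length) →
    ∃ q ∈ grid.zipIdx, q.2 < p.2 ∧ q.1.getD q.2 0 ≠ (grid.getD 0 []).getD 0 0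

instance (grid : List (List Int)) : Decidable (Pre_check_diagonals_left_to_right grid) := by
  unfold Pre_check_diagonals_left_to_right; infer_instance

def pvWitness_check_diagonals_left_to_right : List (List Int) := [[5, 1], [2, 5]]

def Spec_check_diagonals_left_to_right (grid : List (List Int)) (out : Bool) : Prop := out = check_diagonals_left_to_right_alt grid
instance (grid : List (List Int)) (out : Bool) : Decidable (Spec_check_diagonals_left_to_right grid out) := by unfold Spec_check_diagonals_left_to_right; infer_instance

-- ===== CLAIM (what is proved, stated in full; the proofs are below) =====
def Claim_equal_check_diagonals_left_to_right : Prop := ∀ (grid : List (List Int)), Dom_check_diagonals_left_to_right grid → Pre_check_diagonals_left_to_right grid → Spec_check_diagonals_left_to_right grid (check_diagonals_left_to_right grid)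

-- ===== LEMMAS AND PROOFS =====

theorem pv_all_congr {α : Type} (l : List α) (f g : α → Bool)
    (h : ∀ x ∈ l, f x = g x) : l.all f = l.all g := by
  induction l with
  | nil => rfl
  | cons a t ih =>
    simp only [List.all_cons, h a (by simp)]
    rw [ih (fun x hx => h x (by simp [hx]))]

-- inner loop over j only acts at j = i
theorem pv_inner_all (n i : Int) (c : Int → Bool) (h0 : 0 ≤ i) (h1 : i < n) :
    (PySem.List.pyRange 0 n 1).all (fun j => if i == j then c j else true) = c i := by
  cases hc : c i with
  | false =>
    rw [List.all_eq_false]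
    exact ⟨i, by rw [PySem.List.mem_pyRange_one]; exact ⟨h0, h1⟩, by simp [hc]⟩
  | true =>
    rw [List.all_eq_true]
    intro j _
    by_cases hij : i = j
    · simp [← hij, hc]
    · simp [hij]

-- A in terms of the rows: one check per (row, index) pair
theorem pv_range_all_eq_zipIdx_all (grid : List (List Int)) (f : List Int → Int → Bool) :
    (PySem.List.pyRange 0 (grid.length : Int) 1).all (fun i => f (PySem.List.pyGetD grid i []) i)
      = grid.zipIdx.all (fun p => f p.1 (p.2 : Int)) := by
  rw [Bool.eq_iff_iff, List.all_eq_true, List.all_eq_true]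
  constructor
  · intro h p hp
    have hg := List.mem_zipIdx_iff_getElem?.1 hp
    obtain ⟨hlt, hfst⟩ := List.getElem?_eq_some_iff.1 hg
    have := h (p.2 : Int) (by rw [PySem.List.mem_pyRange_one]; exact ⟨by positivity, by exact_mod_cast hlt⟩)
    have hget : PySem.List.pyGetD grid ((p.2 : Nat) : Int) [] = p.1 := by
      rw [PySem.List.pyGetD_natCast]
      simp [List.getD_eq_getElem?_getD, hg]
    rwa [hget] at this
  · intro h i hi
    rw [PySem.List.mem_pyRange_one] at hi
    have hlt : i.toNat < grid.length := by omega
    have hmem : (grid[i.toNat], i.toNat) ∈ grid.zipIdx :=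
      List.mem_zipIdx_iff_getElem?.2 (by simp)
    have := h _ hmem
    simp only at this
    have hget : PySem.List.pyGetD grid i [] = grid[i.toNat] :=
      PySem.List.pyGetD_eq_getElem grid [] hi.1 (by simpa using hi.2)
    have hcast : ((i.toNat : Nat) : Int) = i := by omega
    rw [hget]
    rw [hcast] at this
    exact this

theorem pv_A_eq (grid : List (List Int)) :
    check_diagonals_left_to_right grid =
      grid.zipIdx.all (fun p =>
        PySem.List.pyGetD p.1 (p.2 : Int) 0 == PySem.List.pyGetD (PySem.List.pyGetD grid 0 []) 0 0) := by
  unfold check_diagonals_left_to_right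
  rw [pv_all_congr _ _
      (fun i => PySem.List.pyGetD (PySem.List.pyGetD grid i []) i 0
          == PySem.List.pyGetD (PySem.List.pyGetD grid 0 []) 0 0)
      (by
        intro i hi
        rw [PySem.List.mem_pyRange_one] at hi
        rw [pv_inner_all _ i _ hi.1 hi.2]
        simp [bne])]
  exact pv_range_all_eq_zipIdx_all grid
    (fun row i => PySem.List.pyGetD row i 0 == PySem.List.pyGetD (PySem.List.pyGetD grid 0 []) 0 0)

-- B in terms of the rows
theorem pv_B_go (ref : Int) (l : List (List Int)) (k : Nat) :
    pvAltGo ref (k : Int) l = (l.zipIdx k).all (fun p => PySem.List.pyGetD p.1 (p.2 : Int) 0 == ref) := by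
  induction l generalizing k with
  | nil => rfl
  | cons r t ih =>
    rw [List.zipIdx_cons, List.all_cons]
    have hstep : ((k : Int) + 1) = ((k + 1 : Nat) : Int) := by push_cast; ring
    show (if !(PySem.List.pyGetD r (k : Int) 0 == ref) then false else pvAltGo ref ((k : Int) + 1) t)
      = ((PySem.List.pyGetD r ((k : Nat) : Int) 0 == ref)
          && (t.zipIdx (k + 1)).all (fun p => PySem.List.pyGetD p.1 (p.2 : Int) 0 == ref))
    rw [hstep, ih]
    generalize (PySem.List.pyGetD r ((k : Nat) : Int) 0 == ref) = a
    cases a <;> simp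

-- ===== VERDICT (by name: the statement is the Claim_ definition above) =====
theorem check_diagonals_left_to_right_spec : Claim_equal_check_diagonals_left_to_right := by
  intro grid _ _
  unfold Spec_check_diagonals_left_to_right
  rw [pv_A_eq]
  cases grid with
  | nil => rfl
  | cons r t =>
    show _ = pvAltGo (PySem.List.pyGetD r 0 0) 0 (r :: t)
    rw [show (0 : Int) = ((0 : Nat) : Int) from rfl, pv_B_go]
    simp [PySem.List.pyGetD_zero_cons]
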